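-- pv_equiv track=rewrite | github.com/robnoflop/Schatsi | src/SCHATSI004.py | trigrams
-- ===== SOURCE A (Python) =====
-- def trigrams(term_list):
--     trigram = []
--     trigram_list = []
--
--     # taking 3 terms, write them into a list called trigram, write it into trigram_list; iterate over term_list til end
--     for i in range(0, len(term_list)-2):
--         trigram.append(term_list[i])
--         trigram.append(term_list[i+1])
--         trigram.append(term_list[i+2])
--         trigram_list.append(trigram)
--         trigram = []
--     return trigram_list
-- ===== SOURCE B (Python) =====
-- def trigrams(term_list):
--     if len(term_list) < 3:
--         return []
--     window = term_list[:3]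
--     result = [window]
--     for x in term_list[3:]:
--         window = window[1:] + [x]
--         result.append(window)
--     return result
-- ===== Notes on version B (the rewrite author's own statement) =====
-- stated objective: alternative
-- what changed: Instead of indexing the list three times per step, B keeps the previous trigram as a 3-element window and derives each next trigram by shifting it while iterating over the remaining elements; no index arithmetic and no repeated reads of the input.
import Mathlib
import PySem

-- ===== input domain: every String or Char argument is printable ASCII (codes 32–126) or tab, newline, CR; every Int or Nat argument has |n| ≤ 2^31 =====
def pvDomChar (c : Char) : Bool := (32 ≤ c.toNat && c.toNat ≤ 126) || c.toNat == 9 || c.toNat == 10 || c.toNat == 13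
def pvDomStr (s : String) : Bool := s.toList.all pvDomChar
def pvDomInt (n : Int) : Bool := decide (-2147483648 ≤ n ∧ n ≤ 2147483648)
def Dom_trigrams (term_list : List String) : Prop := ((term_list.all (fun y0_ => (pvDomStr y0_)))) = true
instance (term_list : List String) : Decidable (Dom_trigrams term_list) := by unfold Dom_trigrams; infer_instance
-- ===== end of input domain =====

-- B replaces A's index-based loop by a sliding 3-element window: each trigram is derived
-- from the previous one by shifting, with no index arithmetic (alternative, same O(n) cost).

-- ===== PORT A =====
-- literal port of A: for i in range(0, len-2): append term_list[i], [i+1], [i+2] to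
-- `trigram`, append `trigram` to `trigram_list`, reset `trigram` to []. The indices
-- i, i+1, i+2 are always in range, so the total pyGetD (default never consulted) is exact.
def trigrams (term_list : List String) : List (List String) :=
  ((PySem.List.pyRange 0 ((term_list.length : Int) - 2) 1).foldl
    (fun (st : List String × List (List String)) i =>
      let trigram := st.1 ++ [PySem.List.pyGetD term_list i ""]
      let trigram := trigram ++ [PySem.List.pyGetD term_list (i + 1) ""]
      let trigram := trigram ++ [PySem.List.pyGetD term_list (i + 2) ""]
      let trigram_list := st.2 ++ [trigram]
      ([], trigram_list))
    ([], [])).2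

-- ===== PORT B =====
-- literal port of B: if len < 3 return []; window = term_list[:3]; result = [window];
-- for x in term_list[3:]: window = window[1:] + [x]; result.append(window); return result
def trigrams_alt (term_list : List String) : List (List String) :=
  if term_list.length < 3 then []
  else
    let window := PySem.List.slice term_list none (some 3)
    ((PySem.List.slice term_list (some 3) none).foldl
      (fun (st : List String × List (List String)) x =>
        let window := PySem.List.slice st.1 (some 1) none ++ [x]
        (window, st.2 ++ [window]))
      (window, [window])).2

-- ===== PRECONDITION & SPEC =====
def Spec_trigrams (term_list : List String) (out : List (List String)) : Prop := out = trigrams_alt term_list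
instance (term_list : List String) (out : List (List String)) : Decidable (Spec_trigrams term_list out) := by unfold Spec_trigrams; infer_instance

-- ===== CLAIM (what is proved, stated in full; the proofs are below) =====
def Claim_equal_trigrams : Prop := ∀ (term_list : List String), Dom_trigrams term_list → Spec_trigrams term_list (trigrams term_list)

-- ===== LEMMAS AND PROOFS =====

-- canonical structural trigram list, the meeting point of both proofs
def pvTriList : List String → List (List String)
  | a :: b :: c :: t => [a, b, c] :: pvTriList (b :: c :: t)
  | _ => []

-- the windows B generates, written as a structural recursion
def pvWins (w : List String) : List String → List (List String)
  | [] => []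
  | x :: xs => (w.drop 1 ++ [x]) :: pvWins (w.drop 1 ++ [x]) xs

-- A's loop, whose trigram buffer is reset to [] each iteration, is a map over the index range.
theorem trigrams_foldl_eq_map (l : List String) (is : List Int) (acc : List (List String)) :
    ((is.foldl
      (fun (st : List String × List (List String)) i =>
        let trigram := st.1 ++ [PySem.List.pyGetD l i ""]
        let trigram := trigram ++ [PySem.List.pyGetD l (i + 1) ""]
        let trigram := trigram ++ [PySem.List.pyGetD l (i + 2) ""]
        let trigram_list := st.2 ++ [trigram]
        ([], trigram_list))
      ([], acc)).2 : List (List String))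
    = acc ++ is.map (fun i =>
        [PySem.List.pyGetD l i "", PySem.List.pyGetD l (i + 1) "", PySem.List.pyGetD l (i + 2) ""]) := by
  induction is generalizing acc with
  | nil => simp
  | cons i is ih =>
    rw [List.foldl_cons]
    exact (ih (acc ++ [[PySem.List.pyGetD l i "", PySem.List.pyGetD l (i + 1) "",
      PySem.List.pyGetD l (i + 2) ""]])).trans (by simp)

-- the Nat-indexed map over range (len - 2) is exactly pvTriList
theorem range_map_eq_triList (l : List String) :
    (List.range (l.length - 2)).map
      (fun k => [l.getD k "", l.getD (k + 1) "", l.getD (k + 2) ""])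
    = pvTriList l := by
  induction l with
  | nil => simp [pvTriList]
  | cons a t ih =>
    match t, ih with
    | [], _ => simp [pvTriList]
    | [b], _ => simp [pvTriList]
    | b :: c :: t3, ih =>
      have h : (a :: b :: c :: t3).length - 2 = ((b :: c :: t3).length - 2) + 1 := by simp
      rw [h, List.range_succ_eq_map, List.map_cons, List.map_map, pvTriList]
      refine List.cons_eq_cons.mpr ⟨?_, ?_⟩
      · simp [List.getD]
      · rw [← ih]
        apply List.map_congr_left
        intro k _
        simp [Function.comp]

-- B's fold accumulates exactly the structural window list
theorem foldl_eq_wins (xs : List String) (w : List String) (acc : List (List String)) :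
    ((xs.foldl
      (fun (st : List String × List (List String)) x =>
        let window := PySem.List.slice st.1 (some 1) none ++ [x]
        (window, st.2 ++ [window]))
      (w, acc)).2 : List (List String))
    = acc ++ pvWins w xs := by
  induction xs generalizing w acc with
  | nil => simp [pvWins]
  | cons x xs ih =>
    rw [List.foldl_cons]
    have hstep : (let window := PySem.List.slice (w, acc).1 (some 1) none ++ [x]
        ((window, (w, acc).2 ++ [window]) : List String × List (List String)))
        = (w.drop 1 ++ [x], acc ++ [w.drop 1 ++ [x]]) := by
      simp [PySem.List.slice_from_one, List.drop_one]
    rw [hstep, ih]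
    simp [pvWins]

-- shifting windows starting from [a,b,c] produce the structural trigram list
theorem wins_eq_triList (t : List String) : ∀ (a b c : String),
    ([a, b, c] :: pvWins [a, b, c] t) = pvTriList (a :: b :: c :: t) := by
  induction t with
  | nil => intro a b c; rfl
  | cons x t ih =>
    intro a b c
    have hw : ([a, b, c] : List String).drop 1 ++ [x] = [b, c, x] := by simp
    rw [pvWins, hw, pvTriList]
    exact congrArg _ (ih b c x)

-- B equals the structural trigram list
theorem trigrams_alt_eq_triList (l : List String) : trigrams_alt l = pvTriList l := by
  match l with
  | [] => rfl
  | [a] => rfl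
  | [a, b] => rfl
  | a :: b :: c :: t =>
    unfold trigrams_alt
    rw [if_neg (by simp)]
    simp only
    rw [foldl_eq_wins]
    rw [PySem.List.slice_from _ (by norm_num), PySem.List.slice_to _ (by norm_num)]
    have e3 : ((3 : Int)).toNat = 3 := rfl
    rw [e3]
    have htake : (a :: b :: c :: t).take 3 = [a, b, c] := by simp
    have hdrop : (a :: b :: c :: t).drop 3 = t := by simp
    rw [htake, hdrop, List.singleton_append]
    exact wins_eq_triList t a b c

-- ===== VERDICT (by name: the statement is the Claim_ definition above) =====
theorem trigrams_spec : Claim_equal_trigrams := by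
  intro l _
  show trigrams l = trigrams_alt l
  rw [trigrams_alt_eq_triList]
  rcases l with _ | ⟨a, t⟩
  · rfl
  rcases t with _ | ⟨b, t⟩
  · rfl
  unfold trigrams
  rw [trigrams_foldl_eq_map]
  have h1 : (((a :: b :: t).length : Int)) - 2 = ((t.length : Nat) : Int) := by
    simp; omega
  rw [h1, PySem.List.pyRange_zero_natCast, List.map_map]
  have h2 : (a :: b :: t).length - 2 = t.length := by simp
  have hmain := range_map_eq_triList (a :: b :: t)
  rw [h2] at hmain
  rw [List.nil_append, ← hmain]
  apply List.map_congr_left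
  intro k _
  have ek1 : ((k : Int)) + 1 = (((k + 1 : Nat)) : Int) := by push_cast; ring
  have ek2 : ((k : Int)) + 2 = (((k + 2 : Nat)) : Int) := by push_cast; ring
  simp only [Function.comp_apply]
  rw [ek1, ek2]
  simp only [PySem.List.pyGetD_natCast]
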